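-- pv_equiv track=rewrite | github.com/jynlee7/kaiko_metaproteome | testing/test.py | forgive_IL_mismatch
-- ===== SOURCE A (Python) =====
-- def forgive_IL_mismatch(true_seq, casanovo_seq):
--     """
--     Forgive mismatches between Isoleucine (I) and Leucine (L).
--     """
--     if len(true_seq) != len(casanovo_seq):
--         return False
--
--     for t, p in zip(true_seq, casanovo_seq):
--         if t == p:
--             continue
--         if (t == 'I' and p == 'L') or (t == 'L' and p == 'I'):
--             continue
--         return False
--     return True
-- ===== SOURCE B (Python) =====
-- def forgive_IL_mismatch(true_seq, casanovo_seq):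
--     """Forgive I/L mismatches: normalize both sequences (I -> L) and compare."""
--     norm = lambda seq: tuple('L' if x == 'I' else x for x in seq)
--     return norm(true_seq) == norm(casanovo_seq)
-- ===== Notes on version B (the rewrite author's own statement) =====
-- stated objective: simpler
-- what changed: Replaces the length guard plus early-exit pairwise loop with normalize-both-then-compare: each sequence is mapped to a canonical form with I replaced by L, and a single equality comparison subsumes both the length check and the per-position I/L logic.
import Mathlib
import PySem

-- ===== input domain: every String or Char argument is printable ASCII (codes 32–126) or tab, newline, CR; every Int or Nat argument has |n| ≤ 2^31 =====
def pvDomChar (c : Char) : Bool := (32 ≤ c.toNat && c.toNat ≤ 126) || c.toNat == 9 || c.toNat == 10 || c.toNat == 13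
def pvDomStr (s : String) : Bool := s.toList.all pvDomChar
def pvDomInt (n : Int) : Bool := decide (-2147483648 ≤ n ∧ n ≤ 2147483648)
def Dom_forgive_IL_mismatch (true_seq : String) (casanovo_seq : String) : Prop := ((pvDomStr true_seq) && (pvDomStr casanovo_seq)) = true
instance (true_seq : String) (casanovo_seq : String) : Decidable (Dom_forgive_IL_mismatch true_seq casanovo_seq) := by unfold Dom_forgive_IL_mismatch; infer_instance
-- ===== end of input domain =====

-- ===== PORT A =====
-- loop over zip(true_seq, casanovo_seq), branches in A's order
def pvALoop : List (Char × Char) → Bool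
  | [] => true
  | (t, p) :: rest =>
    if t = p then pvALoop rest
    else if (t = 'I' && p = 'L') || (t = 'L' && p = 'I') then pvALoop rest
    else false

def forgive_IL_mismatch (true_seq : String) (casanovo_seq : String) : Bool :=
  if PySem.Str.len true_seq ≠ PySem.Str.len casanovo_seq then false
  else pvALoop (true_seq.toList.zip casanovo_seq.toList)

-- ===== PORT B =====
-- One honest line: B normalizes both sequences (I -> L) and returns a single equality comparison; objective: simpler.
def pvNorm (c : Char) : Char := if c = 'I' then 'L' else c

def forgive_IL_mismatch_alt (true_seq : String) (casanovo_seq : String) : Bool :=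
  true_seq.toList.map pvNorm == casanovo_seq.toList.map pvNorm

-- ===== PRECONDITION & SPEC =====
def Spec_forgive_IL_mismatch (true_seq : String) (casanovo_seq : String) (out : Bool) : Prop := out = forgive_IL_mismatch_alt true_seq casanovo_seq
instance (true_seq : String) (casanovo_seq : String) (out : Bool) : Decidable (Spec_forgive_IL_mismatch true_seq casanovo_seq out) := by unfold Spec_forgive_IL_mismatch; infer_instance

-- ===== CLAIM (what is proved, stated in full; the proofs are below) =====
def Claim_equal_forgive_IL_mismatch : Prop := ∀ (true_seq : String) (casanovo_seq : String), Dom_forgive_IL_mismatch true_seq casanovo_seq → Spec_forgive_IL_mismatch true_seq casanovo_seq (forgive_IL_mismatch true_seq casanovo_seq)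

-- ===== LEMMAS AND PROOFS =====

-- ===== VERDICT (by name: the statement is the Claim_ definition above) =====
lemma pvCell (t p : Char) (r : Bool) :
    (if t = p then r else if (t = 'I' && p = 'L') || (t = 'L' && p = 'I') then r else false)
      = ((pvNorm t == pvNorm p) && r) := by
  simp only [pvNorm]
  by_cases h : t = p <;> by_cases h1 : t = 'I' <;> by_cases h2 : p = 'L' <;>
    by_cases h3 : t = 'L' <;> by_cases h4 : p = 'I' <;> subst_vars <;>
    (try simp_all) <;> simp_all [eq_comm]

lemma pvLoop_eq (ts ps : List Char) (h : ts.length = ps.length) :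
    pvALoop (ts.zip ps) = (ts.map pvNorm == ps.map pvNorm) := by
  induction ts generalizing ps with
  | nil => cases ps with
    | nil => simp [pvALoop]
    | cons p ps => simp at h
  | cons t ts ih => cases ps with
    | nil => simp at h
    | cons p ps =>
      simp only [List.zip_cons_cons, List.map_cons, pvALoop]
      rw [pvCell, ih ps (by simpa using h)]
      simp [List.cons_beq_cons]

theorem forgive_IL_mismatch_spec : Claim_equal_forgive_IL_mismatch := by
  intro s t _
  unfold Spec_forgive_IL_mismatch forgive_IL_mismatch forgive_IL_mismatch_alt
  by_cases h : PySem.Str.len s = PySem.Str.len t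
  · simp only [h, ne_eq, not_true_eq_false, if_false]
    have hl : s.toList.length = t.toList.length := by
      simpa [PySem.Str.len_eq] using h
    exact pvLoop_eq _ _ hl
  · simp only [ne_eq, h, not_false_eq_true, if_true]
    have hl : s.toList.length ≠ t.toList.length := by
      simpa [PySem.Str.len_eq] using h
    symm
    simp only [beq_eq_false_iff_ne, ne_eq]
    intro he
    exact hl (by simpa using congrArg List.length he)
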